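-- pv_equiv track=rewrite | github.com/zpx2012/squid_copy | src/optimack/analyze/parse_range_group_throughput.py | get_configs_filename
-- ===== SOURCE A (Python) =====
-- def get_configs_filename(in_file):
--     output = [0, 0, 0]
--     fname_fields = in_file.split('.txt')[0].split('_')
--     for fname_field in fname_fields:
--         if 'range' in fname_field:
--             sub_fields = fname_field.split('+')
--             output[0] = int(sub_fields[0].strip('optim'))
--             num_str = sub_fields[1].strip('range')
--             output[1] = int(num_str.split('*')[0])
--             output[2] = int(num_str.split('*')[1])
--     return output
-- ===== SOURCE B (Python) =====
-- def get_configs_filename(in_file):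
--     stem = in_file.split('.txt')[0]
--     i = stem.rfind('range')
--     if i < 0:
--         return [0, 0, 0]
--     lo = stem.rfind('_', 0, i) + 1
--     hi = stem.find('_', i)
--     field = stem[lo:] if hi < 0 else stem[lo:hi]
--     parts = field.split('+')
--     num = parts[1].strip('range')
--     return [int(parts[0].strip('optim')), int(num.split('*')[0]), int(num.split('*')[1])]
-- ===== Notes on version B (the rewrite author's own statement) =====
-- stated objective: alternative
-- what changed: B never iterates over the '_'-fields: it locates the last occurrence of 'range' with rfind, finds the enclosing field's boundaries with rfind('_',0,i)/find('_',i), and parses that single slice, whereas A splits the stem into fields and scans them all, overwriting an accumulator.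
import Mathlib
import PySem

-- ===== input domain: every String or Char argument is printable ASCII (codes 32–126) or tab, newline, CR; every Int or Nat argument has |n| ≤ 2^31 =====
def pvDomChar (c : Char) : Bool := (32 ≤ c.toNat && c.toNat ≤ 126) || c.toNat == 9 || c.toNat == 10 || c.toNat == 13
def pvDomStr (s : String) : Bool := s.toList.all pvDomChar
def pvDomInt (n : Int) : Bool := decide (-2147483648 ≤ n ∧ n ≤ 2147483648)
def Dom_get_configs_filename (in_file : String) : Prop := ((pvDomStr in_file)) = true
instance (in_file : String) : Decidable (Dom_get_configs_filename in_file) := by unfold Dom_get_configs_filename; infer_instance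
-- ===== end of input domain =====

-- B replaces A's scan over all '_'-fields by direct index arithmetic: one rfind('range') for the
-- last occurrence, rfind('_')/find('_') for the enclosing field's bounds, and a single slice
-- (objective: alternative decomposition, same cost).
-- shared primitive: s.split(sep) for a non-empty literal sep (split? is some there)
def pvSplit (s sep : String) : List String := (PySem.Str.split? s sep).getD []

-- ===== PORT A =====
def get_configs_filename (in_file : String) : List Int :=
  let output : List Int := [0, 0, 0]
  let fname_fields := pvSplit ((PySem.List.pyGet? (pvSplit in_file ".txt") 0).getD "") "_"
  fname_fields.foldl (fun output fname_field =>
    if PySem.Str.isIn "range" fname_field then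
      let sub_fields := pvSplit fname_field "+"
      let o0 := (PySem.Int.ofStr? (PySem.Str.stripChars ((PySem.List.pyGet? sub_fields 0).getD "") "optim")).getD 0
      let num_str := PySem.Str.stripChars ((PySem.List.pyGet? sub_fields 1).getD "") "range"
      let o1 := (PySem.Int.ofStr? ((PySem.List.pyGet? (pvSplit num_str "*") 0).getD "")).getD 0
      let o2 := (PySem.Int.ofStr? ((PySem.List.pyGet? (pvSplit num_str "*") 1).getD "")).getD 0
      [o0, o1, o2]
    else output) output

-- ===== PORT B =====
-- B's parsing of the one extracted field (parts = field.split('+'), etc.)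
def pvParseField (field : String) : List Int :=
  let parts := pvSplit field "+"
  let num := PySem.Str.stripChars ((PySem.List.pyGet? parts 1).getD "") "range"
  [ (PySem.Int.ofStr? (PySem.Str.stripChars ((PySem.List.pyGet? parts 0).getD "") "optim")).getD 0,
    (PySem.Int.ofStr? ((PySem.List.pyGet? (pvSplit num "*") 0).getD "")).getD 0,
    (PySem.Int.ofStr? ((PySem.List.pyGet? (pvSplit num "*") 1).getD "")).getD 0 ]

def get_configs_filename_alt (in_file : String) : List Int :=
  let stem := (PySem.List.pyGet? (pvSplit in_file ".txt") 0).getD ""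
  let i := PySem.Str.rfind stem "range"
  if i < 0 then [0, 0, 0]
  else
    let lo := PySem.Str.rfindFrom stem "_" 0 (some i) + 1
    let hi := PySem.Str.findFrom stem "_" i none
    let field := if hi < 0 then PySem.Str.slice stem (some lo) none
                 else PySem.Str.slice stem (some lo) (some hi)
    pvParseField field

-- ===== PRECONDITION & SPEC =====
-- Pre_ excludes exactly the inputs on which Python A raises (IndexError/ValueError): some
-- '_'-field containing 'range' that lacks a '+' part, lacks a '*' part, or whose stripped
-- pieces are not int() literals.
def Pre_get_configs_filename (in_file : String) : Prop :=
  ∀ f ∈ pvSplit ((PySem.List.pyGet? (pvSplit in_file ".txt") 0).getD "") "_",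
    PySem.Str.isIn "range" f = true →
      (2 ≤ (pvSplit f "+").length ∧
       (PySem.Int.ofStr? (PySem.Str.stripChars (((pvSplit f "+").getD 0 "")) "optim")).isSome = true ∧
       2 ≤ (pvSplit (PySem.Str.stripChars ((pvSplit f "+").getD 1 "") "range") "*").length ∧
       (PySem.Int.ofStr? ((pvSplit (PySem.Str.stripChars ((pvSplit f "+").getD 1 "") "range") "*").getD 0 "")).isSome = true ∧
       (PySem.Int.ofStr? ((pvSplit (PySem.Str.stripChars ((pvSplit f "+").getD 1 "") "range") "*").getD 1 "")).isSome = true)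
instance (in_file : String) : Decidable (Pre_get_configs_filename in_file) := by unfold Pre_get_configs_filename; infer_instance

def pvWitness_get_configs_filename : String := "optim3+range4*5_log.txt"

def Spec_get_configs_filename (in_file : String) (out : List Int) : Prop := out = get_configs_filename_alt in_file
instance (in_file : String) (out : List Int) : Decidable (Spec_get_configs_filename in_file out) := by unfold Spec_get_configs_filename; infer_instance

-- ===== CLAIM (what is proved, stated in full; the proofs are below) =====
def Claim_equal_get_configs_filename : Prop := ∀ (in_file : String), Dom_get_configs_filename in_file → Pre_get_configs_filename in_file → Spec_get_configs_filename in_file (get_configs_filename in_file)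

-- ===== LEMMAS AND PROOFS =====

-- A left fold that replaces its accumulator on every element satisfying p ends with the value
-- of the LAST such element: the first hit of find? on the reversed list.
lemma foldl_if_eq_find_rev {α β : Type} (p : α → Bool) (g : α → β) :
    ∀ (l : List α) (acc : β),
      l.foldl (fun a f => if p f then g f else a) acc
        = (match l.reverse.find? p with
           | some f => g f
           | none => acc) := by
  intro l
  induction l with
  | nil => intro acc; simp
  | cons x t ih =>
    intro acc
    simp only [List.foldl_cons, ih, List.reverse_cons, List.find?_append]
    cases h : t.reverse.find? p with
    | some f => simp
    | none =>
      simp only [Option.none_or]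
      by_cases hp : p x <;> simp [hp]

-- the '_'-fields of a char list, as a structural recursion (= CPython's split('_'))
def pvFields : List Char → List (List Char)
  | [] => [[]]
  | c :: t =>
    match pvFields t with
    | f :: fs => if c = '_' then [] :: f :: fs else (c :: f) :: fs
    | [] => [[]]

lemma pvFields_ne_nil (l : List Char) : pvFields l ≠ [] := by
  cases l with
  | nil => simp [pvFields]
  | cons c t =>
    simp only [pvFields]
    cases h : pvFields t with
    | nil => simp
    | cons f fs => by_cases hc : c = '_' <;> simp [hc]

lemma splitOn_go_eq (fuel : ℕ) :
    ∀ (l cur : List Char) (acc : List (List Char)), l.length < fuel →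
      PySem.Chars.splitOn.go ['_'] fuel l cur acc
        = acc.reverse ++ (match pvFields l with
                          | f :: fs => (cur.reverse ++ f) :: fs
                          | [] => []) := by
  induction fuel with
  | zero => intro l cur acc h; omega
  | succ fuel ih =>
    intro l cur acc h
    cases l with
    | nil => simp [PySem.Chars.splitOn.go, pvFields]
    | cons c rest =>
      simp only [PySem.Chars.splitOn.go]
      by_cases hc : c = '_'
      · subst hc
        have hpre : (['_'] : List Char).isPrefixOf ('_' :: rest) = true := by
          simp [List.isPrefixOf]
        simp only [hpre, if_pos, List.length_cons] at *
        have hd : List.drop (([] : List Char).length + 1) ('_' :: rest) = rest := by simp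
        rw [hd, ih rest [] (cur.reverse :: acc) (by simpa using Nat.lt_of_succ_lt_succ h)]
        simp only [pvFields]
        cases hfr : pvFields rest with
        | nil => exact absurd hfr (pvFields_ne_nil rest)
        | cons f fs => simp
      · have hpre : (['_'] : List Char).isPrefixOf (c :: rest) = false := by
          simp [List.isPrefixOf]
          exact fun h => absurd h.symm hc
        simp only [hpre, Bool.false_eq_true, if_false]
        rw [ih rest (c :: cur) acc (by simp at h; omega)]
        simp only [pvFields]
        cases hfr : pvFields rest with
        | nil => exact absurd hfr (pvFields_ne_nil rest)
        | cons f fs => simp [hc]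

lemma splitOn_eq_pvFields (l : List Char) :
    PySem.Chars.splitOn l ['_'] = pvFields l := by
  unfold PySem.Chars.splitOn
  rw [splitOn_go_eq (l.length + 1) l [] [] (by omega)]
  cases hfr : pvFields l with
  | nil => exact absurd hfr (pvFields_ne_nil l)
  | cons f fs => simp

lemma pvFields_no_sep (l : List Char) (h : '_' ∉ l) : pvFields l = [l] := by
  induction l with
  | nil => simp [pvFields]
  | cons c t ih =>
    simp only [List.mem_cons, not_or] at h
    simp [pvFields, ih h.2, Ne.symm h.1]

lemma pvFields_append (a b : List Char) (h : '_' ∉ a) :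
    pvFields (a ++ '_' :: b) = a :: pvFields b := by
  induction a with
  | nil =>
    simp only [List.nil_append, pvFields]
    cases hfb : pvFields b with
    | nil => exact absurd hfb (pvFields_ne_nil b)
    | cons f fs => simp
  | cons c t ih =>
    simp only [List.mem_cons, not_or] at h
    simp [pvFields, ih h.2, Ne.symm h.1]

-- ===== occurrence characterizations of find / rfind =====

lemma rfind_go_cases (s sub : List Char) (k : ℕ) :
    (PySem.Chars.rfind.go s sub k = -1 ∧ ∀ j ≤ k, ¬ sub.isPrefixOf (s.drop j) = true) ∨
    (∃ j ≤ k, PySem.Chars.rfind.go s sub k = (j : ℤ) ∧ sub.isPrefixOf (s.drop j) = true ∧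
      ∀ j', j < j' → j' ≤ k → ¬ sub.isPrefixOf (s.drop j') = true) := by
  induction k with
  | zero =>
    by_cases h : sub.isPrefixOf s = true
    · right; exact ⟨0, le_refl 0, by simp [PySem.Chars.rfind.go, h], by simpa using h, by omega⟩
    · left
      constructor
      · simp only [PySem.Chars.rfind.go]
        simp [h]
      · intro j hj; interval_cases j; simpa using h
  | succ k ih =>
    by_cases h : sub.isPrefixOf (s.drop (k + 1)) = true
    · right
      refine ⟨k + 1, le_refl _, ?_, h, by omega⟩
      simp only [PySem.Chars.rfind.go, h, if_pos]
    · have hgo : PySem.Chars.rfind.go s sub (k + 1) = PySem.Chars.rfind.go s sub k := by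
        simp only [PySem.Chars.rfind.go, h]
        simp
      rcases ih with ⟨h1, h2⟩ | ⟨j, hj, h1, h2, h3⟩
      · left
        refine ⟨by rw [hgo]; exact h1, ?_⟩
        intro j hj
        rcases Nat.lt_or_ge j (k + 1) with hlt | hge
        · exact h2 j (by omega)
        · have : j = k + 1 := by omega
          subst this; exact h
      · right
        refine ⟨j, by omega, by rw [hgo]; exact h1, h2, ?_⟩
        intro j' hj1 hj2
        rcases Nat.lt_or_ge j' (k + 1) with hlt | hge
        · exact h3 j' hj1 (by omega)
        · have : j' = k + 1 := by omega
          subst this; exact h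

lemma rfind_cases (s sub : List Char) (hsub : sub ≠ []) :
    (PySem.Chars.rfind s sub = -1 ∧ ∀ j, ¬ sub.isPrefixOf (s.drop j) = true) ∨
    (∃ j ≤ s.length, PySem.Chars.rfind s sub = (j : ℤ) ∧ sub.isPrefixOf (s.drop j) = true ∧
      ∀ j', j < j' → ¬ sub.isPrefixOf (s.drop j') = true) := by
  have hbeyond : ∀ j, s.length < j → ¬ sub.isPrefixOf (s.drop j) = true := by
    intro j hj
    rw [List.drop_eq_nil_of_le (by omega)]
    cases sub with
    | nil => exact absurd rfl hsub
    | cons c cs => simp [List.isPrefixOf]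
  unfold PySem.Chars.rfind
  rcases rfind_go_cases s sub s.length with ⟨h1, h2⟩ | ⟨j, hj, h1, h2, h3⟩
  · left
    refine ⟨h1, fun j => ?_⟩
    by_cases hle : j ≤ s.length
    · exact h2 j hle
    · exact hbeyond j (by omega)
  · right
    refine ⟨j, hj, h1, h2, fun j' hj' => ?_⟩
    by_cases hle : j' ≤ s.length
    · exact h3 j' hj' hle
    · exact hbeyond j' (by omega)

lemma find_go_cases (sub : List Char) (l : List Char) (hsub : sub ≠ []) : ∀ (k : ℕ),
    (PySem.Chars.find.go sub l k = -1 ∧ ∀ j, ¬ sub.isPrefixOf (l.drop j) = true) ∨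
    (∃ j ≤ l.length, PySem.Chars.find.go sub l k = ((k + j : ℕ) : ℤ) ∧ sub.isPrefixOf (l.drop j) = true ∧
      ∀ j' < j, ¬ sub.isPrefixOf (l.drop j') = true) := by
  induction l with
  | nil =>
    intro k
    left
    constructor
    · simp only [PySem.Chars.find.go]
      cases sub with
      | nil => exact absurd rfl hsub
      | cons c cs => simp
    · intro j
      cases sub with
      | nil => exact absurd rfl hsub
      | cons c cs => simp [List.isPrefixOf]
  | cons c t ih =>
    intro k
    by_cases h : sub.isPrefixOf (c :: t) = true
    · right
      refine ⟨0, by simp, ?_, by simpa using h, by omega⟩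
      simp only [PySem.Chars.find.go, h, if_pos]
      simp
    · have hgo : PySem.Chars.find.go sub (c :: t) k = PySem.Chars.find.go sub t (k + 1) := by
        simp only [PySem.Chars.find.go, h]
        simp
      rcases ih (k + 1) with ⟨h1, h2⟩ | ⟨j, hj, h1, h2, h3⟩
      · left
        refine ⟨by rw [hgo]; exact h1, ?_⟩
        intro j
        cases j with
        | zero => simpa using h
        | succ j => simpa using h2 j
      · right
        refine ⟨j + 1, by simpa using hj, ?_, by simpa using h2, ?_⟩
        · rw [hgo, h1]; push_cast; ring_nf
        · intro j' hj'
          cases j' with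
          | zero => simpa using h
          | succ j' => simpa using h3 j' (by omega)

lemma find_cases (l sub : List Char) (hsub : sub ≠ []) :
    (PySem.Chars.find l sub = -1 ∧ ∀ j, ¬ sub.isPrefixOf (l.drop j) = true) ∨
    (∃ j ≤ l.length, PySem.Chars.find l sub = (j : ℤ) ∧ sub.isPrefixOf (l.drop j) = true ∧
      ∀ j' < j, ¬ sub.isPrefixOf (l.drop j') = true) := by
  unfold PySem.Chars.find
  rcases find_go_cases sub l hsub 0 with ⟨h1, h2⟩ | ⟨j, hj, h1, h2, h3⟩
  · left; exact ⟨h1, h2⟩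
  · right; exact ⟨j, hj, by simpa using h1, h2, h3⟩

-- occurrence transfer across 'a ++ '_' :: b' when the pattern contains no '_'
lemma prefix_append_sep_iff (sub a b : List Char) (hsub : '_' ∉ sub) :
    sub.isPrefixOf (a ++ '_' :: b) = true ↔ sub.isPrefixOf a = true := by
  simp only [List.isPrefixOf_iff_prefix]
  constructor
  · intro h
    by_cases hle : sub.length ≤ a.length
    · rw [List.prefix_iff_eq_take] at h ⊢
      rwa [List.take_append_of_le_length hle] at h
    · have hlt : a.length < sub.length := by omega
      exfalso
      apply hsub
      have hg : sub[a.length]'hlt = (a ++ '_' :: b)[a.length]'(by simp) := h.getElem hlt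
      have hmem : (a ++ '_' :: b)[a.length]'(by simp) = '_' := by simp
      rw [hmem] at hg
      rw [← hg]
      exact List.getElem_mem hlt
  · intro h
    exact h.trans (List.prefix_append a ('_' :: b))

lemma occ_left (sub a b : List Char) (hsub : '_' ∉ sub) (j : ℕ) (hj : j ≤ a.length) :
    sub.isPrefixOf ((a ++ '_' :: b).drop j) = sub.isPrefixOf (a.drop j) := by
  rw [List.drop_append_of_le_length hj]
  exact Bool.eq_iff_iff.mpr (prefix_append_sep_iff sub (a.drop j) b hsub)

lemma occ_right (sub a b : List Char) (j : ℕ) :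
    sub.isPrefixOf ((a ++ '_' :: b).drop (a.length + 1 + j)) = sub.isPrefixOf (b.drop j) := by
  have : List.drop (a.length + 1 + j) (a ++ '_' :: b) = b.drop j := by
    rw [List.drop_append, List.drop_eq_nil_of_le (by omega)]
    rw [show a.length + 1 + j - a.length = j + 1 by omega]
    simp
  rw [this]

lemma occ_at_sep (sub a b : List Char) (hsub : '_' ∉ sub) (hne : sub ≠ []) :
    sub.isPrefixOf ((a ++ '_' :: b).drop a.length) = false := by
  have : List.drop a.length (a ++ '_' :: b) = '_' :: b := by
    rw [List.drop_append_of_le_length (le_refl _)]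
    simp
  rw [this]
  cases sub with
  | nil => exact absurd rfl hne
  | cons c cs =>
    simp only [List.mem_cons, not_or] at hsub
    simp [List.isPrefixOf, Ne.symm hsub.1]

-- single-char pattern ['_']: occurrence at j ↔ the char at j is '_'
lemma occ_underscore (x : List Char) (j : ℕ) :
    (['_'] : List Char).isPrefixOf (x.drop j) = true ↔ x[j]? = some '_' := by
  rw [← List.head?_drop]
  cases h : x.drop j with
  | nil => simp [List.isPrefixOf]
  | cons c cs =>
    simp only [List.head?_cons]
    simp [List.isPrefixOf]
    constructor
    · intro hc; exact hc.symm
    · intro hc; exact hc.symm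

lemma rfind_no_underscore (x : List Char) (h : '_' ∉ x) :
    PySem.Chars.rfind x ['_'] = -1 := by
  rcases rfind_cases x ['_'] (by simp) with ⟨h1, _⟩ | ⟨j, hj, h1, h2, _⟩
  · exact h1
  · exfalso
    rw [occ_underscore] at h2
    exact h (List.mem_of_getElem? h2)

lemma find_no_underscore (x : List Char) (h : '_' ∉ x) :
    PySem.Chars.find x ['_'] = -1 := by
  rcases find_cases x ['_'] (by simp) with ⟨h1, _⟩ | ⟨j, hj, h1, h2, _⟩
  · exact h1
  · exfalso
    rw [occ_underscore] at h2
    exact h (List.mem_of_getElem? h2)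

-- first '_' in (a ++ '_' :: b) with '_' ∉ a is at a.length
lemma find_underscore_append (a b : List Char) (h : '_' ∉ a) :
    PySem.Chars.find (a ++ '_' :: b) ['_'] = (a.length : ℤ) := by
  rcases find_cases (a ++ '_' :: b) ['_'] (by simp) with ⟨h1, h2⟩ | ⟨j, hj, h1, h2, h3⟩
  · exfalso
    apply h2 a.length
    rw [occ_underscore]
    simp
  · have hocc : ((a ++ '_' :: b)[a.length]? = some '_') := by simp
    rcases Nat.lt_trichotomy j a.length with hlt | heq | hgt
    · exfalso
      rw [occ_underscore] at h2
      rw [List.getElem?_append_left hlt] at h2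
      exact h (List.mem_of_getElem? h2)
    · rw [h1, heq]
    · exfalso
      exact h3 a.length hgt (by rw [occ_underscore]; exact hocc)

-- last '_' in (a ++ '_' :: b) with '_' ∉ a: at a.length if none in b, else shifted last of b
lemma rfind_underscore_append (a b : List Char) (h : '_' ∉ a) :
    PySem.Chars.rfind (a ++ '_' :: b) ['_'] =
      (if PySem.Chars.rfind b ['_'] = -1 then (a.length : ℤ)
       else (a.length : ℤ) + 1 + PySem.Chars.rfind b ['_']) := by
  rcases rfind_cases b ['_'] (by simp) with ⟨hb1, hb2⟩ | ⟨jb, hjb, hb1, hb2, hb3⟩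
  · rw [if_pos hb1]
    rcases rfind_cases (a ++ '_' :: b) ['_'] (by simp) with ⟨h1, h2⟩ | ⟨j, hj, h1, h2, h3⟩
    · exfalso
      apply h2 a.length
      rw [occ_underscore]; simp
    · rcases Nat.lt_trichotomy j a.length with hlt | heq | hgt
      · exfalso
        apply h3 a.length hlt
        rw [occ_underscore]; simp
      · rw [h1, heq]
      · exfalso
        have hj2 : a.length + 1 + (j - a.length - 1) = j := by omega
        rw [← hj2, occ_right] at h2
        exact hb2 _ h2
  · rw [hb1]
    have hne : ¬ ((jb : ℤ) = -1) := by omega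
    rw [if_neg hne]
    rcases rfind_cases (a ++ '_' :: b) ['_'] (by simp) with ⟨h1, h2⟩ | ⟨j, hj, h1, h2, h3⟩
    · exfalso
      apply h2 (a.length + 1 + jb)
      rw [occ_right]
      exact hb2
    · rcases Nat.lt_trichotomy j (a.length + 1 + jb) with hlt | heq | hgt
      · exfalso
        apply h3 (a.length + 1 + jb) hlt
        rw [occ_right]
        exact hb2
      · rw [h1, heq]; push_cast; ring
      · exfalso
        have hj2 : a.length + 1 + (j - a.length - 1) = j := by omega
        have : (['_'] : List Char).isPrefixOf ((a ++ '_' :: b).drop j) = true := h2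
        rw [← hj2, occ_right] at this
        exact hb3 (j - a.length - 1) (by omega) this

-- last occurrence of a '_'-free pattern in (a ++ '_' :: b): in b if any, else in a
lemma rfind_sub_append (sub a b : List Char) (hsub : '_' ∉ sub) (hne : sub ≠ []) :
    PySem.Chars.rfind (a ++ '_' :: b) sub =
      (if PySem.Chars.rfind b sub = -1 then PySem.Chars.rfind a sub
       else (a.length : ℤ) + 1 + PySem.Chars.rfind b sub) := by
  rcases rfind_cases b sub hne with ⟨hb1, hb2⟩ | ⟨jb, hjb, hb1, hb2, hb3⟩
  · rw [if_pos hb1]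
    rcases rfind_cases a sub hne with ⟨ha1, ha2⟩ | ⟨ja, hja, ha1, ha2, ha3⟩
    · rw [ha1]
      rcases rfind_cases (a ++ '_' :: b) sub hne with ⟨h1, _⟩ | ⟨j, hj, h1, h2, h3⟩
      · exact h1
      · exfalso
        rcases Nat.lt_trichotomy j a.length with hlt | heq | hgt
        · rw [occ_left sub a b hsub j (by omega)] at h2
          exact ha2 j h2
        · subst heq
          rw [occ_at_sep sub a b hsub hne] at h2
          simp at h2
        · have hj2 : a.length + 1 + (j - a.length - 1) = j := by omega
          rw [← hj2, occ_right] at h2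
          exact hb2 _ h2
    · rw [ha1]
      rcases rfind_cases (a ++ '_' :: b) sub hne with ⟨h1, h2⟩ | ⟨j, hj, h1, h2, h3⟩
      · exfalso
        apply h2 ja
        rw [occ_left sub a b hsub ja hja]
        exact ha2
      · rcases Nat.lt_trichotomy j ja with hlt | heq | hgt
        · exfalso
          apply h3 ja hlt
          rw [occ_left sub a b hsub ja hja]
          exact ha2
        · rw [h1, heq]
        · exfalso
          rcases Nat.lt_trichotomy j a.length with hlt2 | heq2 | hgt2
          · rw [occ_left sub a b hsub j (by omega)] at h2
            exact ha3 j hgt h2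
          · subst heq2
            rw [occ_at_sep sub a b hsub hne] at h2
            simp at h2
          · have hj2 : a.length + 1 + (j - a.length - 1) = j := by omega
            rw [← hj2, occ_right] at h2
            exact hb2 _ h2
  · rw [hb1, if_neg (by omega)]
    rcases rfind_cases (a ++ '_' :: b) sub hne with ⟨h1, h2⟩ | ⟨j, hj, h1, h2, h3⟩
    · exfalso
      apply h2 (a.length + 1 + jb)
      rw [occ_right]
      exact hb2
    · rcases Nat.lt_trichotomy j (a.length + 1 + jb) with hlt | heq | hgt
      · exfalso
        apply h3 (a.length + 1 + jb) hlt
        rw [occ_right]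
        exact hb2
      · rw [h1, heq]; push_cast; ring
      · exfalso
        have hj2 : a.length + 1 + (j - a.length - 1) = j := by omega
        rw [← hj2, occ_right] at h2
        exact hb3 (j - a.length - 1) (by omega) h2

lemma isIn_iff_rfind_ne (x sub : List Char) (hne : sub ≠ []) :
    PySem.Chars.isIn sub x = true ↔ PySem.Chars.rfind x sub ≠ -1 := by
  rw [← PySem.Chars.exists_prefix_drop_iff_isIn]
  rcases rfind_cases x sub hne with ⟨h1, h2⟩ | ⟨j, hj, h1, h2, h3⟩
  · simp only [h1]
    constructor
    · rintro ⟨j, hp⟩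
      exact absurd (List.isPrefixOf_iff_prefix.mpr hp) (h2 j)
    · intro h; exact absurd rfl h
  · constructor
    · intro _; omega
    · intro _; exact ⟨j, List.isPrefixOf_iff_prefix.mp h2⟩

lemma rfind_nonneg_le (x sub : List Char) (hne : sub ≠ []) (h : PySem.Chars.rfind x sub ≠ -1) :
    0 ≤ PySem.Chars.rfind x sub ∧ PySem.Chars.rfind x sub ≤ (x.length : ℤ) ∧
    sub.isPrefixOf (x.drop (PySem.Chars.rfind x sub).toNat) = true := by
  rcases rfind_cases x sub hne with ⟨h1, _⟩ | ⟨j, hj, h1, h2, _⟩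
  · exact absurd h1 h
  · rw [h1]
    refine ⟨by omega, by omega, ?_⟩
    simpa using h2

-- B's extracted field at the char-list level (what the port's slice computes)
def pvBField (s : List Char) : List Char :=
  let i := PySem.Chars.rfind s "range".toList
  let r := PySem.Chars.rfind (s.take i.toNat) ['_']
  let lo := (if r = -1 then (-1 : ℤ) else r) + 1
  let q := PySem.Chars.find (s.drop i.toNat) ['_']
  if q = -1 then s.drop lo.toNat
  else (s.drop lo.toNat).take ((i + q).toNat - lo.toNat)

lemma neg_one_le_rfind (x sub : List Char) (hne : sub ≠ []) :
    -1 ≤ PySem.Chars.rfind x sub := by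
  rcases rfind_cases x sub hne with ⟨h1, _⟩ | ⟨j, _, h1, _, _⟩ <;> rw [h1] <;> omega

lemma drop_sep (a b : List Char) (m : ℕ) :
    List.drop (a.length + 1 + m) (a ++ '_' :: b) = b.drop m := by
  rw [List.drop_append, List.drop_eq_nil_of_le (by omega)]
  rw [show a.length + 1 + m - a.length = m + 1 by omega]
  simp

lemma take_sep (a b : List Char) (m : ℕ) :
    List.take (a.length + 1 + m) (a ++ '_' :: b) = a ++ '_' :: b.take m := by
  rw [List.take_append, List.take_of_length_le (by omega)]
  rw [show a.length + 1 + m - a.length = m + 1 by omega]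
  simp

-- the no-'_' (single-field) case
lemma pv_single (s : List Char) (hc : '_' ∉ s) :
    (PySem.Chars.rfind s "range".toList = -1 →
      (pvFields s).reverse.find? (fun f => PySem.Chars.isIn "range".toList f) = none) ∧
    (PySem.Chars.rfind s "range".toList ≠ -1 →
      (pvFields s).reverse.find? (fun f => PySem.Chars.isIn "range".toList f) = some (pvBField s)) := by
  have hRne : "range".toList ≠ [] := by decide
  rw [pvFields_no_sep s hc]
  constructor
  · intro h
    have hIn : PySem.Chars.isIn "range".toList s = false := by
      by_cases hi : PySem.Chars.isIn "range".toList s = true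
      · exact absurd h ((isIn_iff_rfind_ne s _ hRne).mp hi)
      · simpa using hi
    rw [List.reverse_singleton, List.find?_cons_of_neg (by rw [hIn]; simp), List.find?_nil]
  · intro h
    have hIn : PySem.Chars.isIn "range".toList s = true := (isIn_iff_rfind_ne s _ hRne).mpr h
    obtain ⟨h0, hle, _⟩ := rfind_nonneg_le s _ hRne h
    have hr : PySem.Chars.rfind (s.take (PySem.Chars.rfind s "range".toList).toNat) ['_'] = -1 :=
      rfind_no_underscore _ (fun hm => hc (List.mem_of_mem_take hm))
    have hq : PySem.Chars.find (s.drop (PySem.Chars.rfind s "range".toList).toNat) ['_'] = -1 :=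
      find_no_underscore _ (fun hm => hc (List.mem_of_mem_drop hm))
    have hB : pvBField s = s := by
      simp only [pvBField, hr, hq]
      norm_num
    rw [List.reverse_singleton, List.find?_cons_of_pos hIn, hB]

-- B's slice picks a itself when the last "range" is in a and none is in b
lemma pvBField_left (a b : List Char) (ha : '_' ∉ a)
    (hRa : PySem.Chars.rfind a "range".toList ≠ -1)
    (hRb : PySem.Chars.rfind b "range".toList = -1) :
    pvBField (a ++ '_' :: b) = a := by
  have hRu : '_' ∉ "range".toList := by decide
  have hRne : "range".toList ≠ [] := by decide
  obtain ⟨h0, hle, _⟩ := rfind_nonneg_le a _ hRne hRa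
  have hiS : PySem.Chars.rfind (a ++ '_' :: b) "range".toList = PySem.Chars.rfind a "range".toList := by
    rw [rfind_sub_append _ a b hRu hRne, if_pos hRb]
  have hk : (PySem.Chars.rfind a "range".toList).toNat ≤ a.length := by omega
  simp only [pvBField, hiS]
  rw [List.take_append_of_le_length hk, List.drop_append_of_le_length hk]
  rw [rfind_no_underscore _ (fun hm => ha (List.mem_of_mem_take hm))]
  rw [find_underscore_append _ b (fun hm => ha (List.mem_of_mem_drop hm))]
  rw [if_pos rfl, if_neg (by omega : ¬ ((List.drop (PySem.Chars.rfind a "range".toList).toNat a).length : ℤ) = -1)]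
  rw [List.length_drop]
  have h1 : ((-1 : ℤ) + 1).toNat = 0 := by omega
  rw [h1]
  have h2 : (PySem.Chars.rfind a "range".toList + ((a.length - (PySem.Chars.rfind a "range".toList).toNat : ℕ) : ℤ)).toNat - 0 = a.length := by omega
  rw [h2, List.drop_zero, List.take_left]

-- B's slice ignores a when the last "range" is in b
lemma pvBField_right (a b : List Char) (ha : '_' ∉ a)
    (hRb : PySem.Chars.rfind b "range".toList ≠ -1) :
    pvBField (a ++ '_' :: b) = pvBField b := by
  have hRu : '_' ∉ "range".toList := by decide
  have hRne : "range".toList ≠ [] := by decide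
  obtain ⟨hb0, hble, _⟩ := rfind_nonneg_le b _ hRne hRb
  have hiS : PySem.Chars.rfind (a ++ '_' :: b) "range".toList
      = (a.length : ℤ) + 1 + PySem.Chars.rfind b "range".toList := by
    rw [rfind_sub_append _ a b hRu hRne, if_neg hRb]
  have htn : ((a.length : ℤ) + 1 + PySem.Chars.rfind b "range".toList).toNat
      = a.length + 1 + (PySem.Chars.rfind b "range".toList).toNat := by omega
  simp only [pvBField, hiS, htn, take_sep, drop_sep]
  rw [rfind_underscore_append a _ ha]
  have hrbge : -1 ≤ PySem.Chars.rfind (b.take (PySem.Chars.rfind b "range".toList).toNat) ['_'] :=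
    neg_one_le_rfind _ _ (by simp)
  have hqge : -1 ≤ PySem.Chars.find (b.drop (PySem.Chars.rfind b "range".toList).toNat) ['_'] :=
    PySem.Chars.neg_one_le_find _ _
  by_cases hrb1 : PySem.Chars.rfind (b.take (PySem.Chars.rfind b "range".toList).toNat) ['_'] = -1
  · rw [if_pos hrb1, hrb1]
    rw [if_neg (by omega : ¬ ((a.length : ℤ)) = -1), if_pos rfl]
    have hlo : ((a.length : ℤ) + 1).toNat = a.length + 1 + ((-1 : ℤ) + 1).toNat := by omega
    by_cases hq1 : PySem.Chars.find (b.drop (PySem.Chars.rfind b "range".toList).toNat) ['_'] = -1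
    · rw [if_pos hq1, if_pos hq1, hlo, drop_sep]
    · rw [if_neg hq1, if_neg hq1, hlo, drop_sep]
      congr 1
      omega
  · rw [if_neg hrb1, if_neg hrb1]
    rw [if_neg (by omega : ¬ ((a.length : ℤ) + 1 + PySem.Chars.rfind (b.take (PySem.Chars.rfind b "range".toList).toNat) ['_']) = -1)]
    have hlo : ((a.length : ℤ) + 1 + PySem.Chars.rfind (b.take (PySem.Chars.rfind b "range".toList).toNat) ['_'] + 1).toNat
        = a.length + 1 + (PySem.Chars.rfind (b.take (PySem.Chars.rfind b "range".toList).toNat) ['_'] + 1).toNat := by omega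
    by_cases hq1 : PySem.Chars.find (b.drop (PySem.Chars.rfind b "range".toList).toNat) ['_'] = -1
    · rw [if_pos hq1, if_pos hq1, hlo, drop_sep]
    · rw [if_neg hq1, if_neg hq1, hlo, drop_sep]
      congr 1
      omega

-- the heart: last '_'-field containing "range" = B's index-arithmetic slice
lemma pv_main : ∀ (n : ℕ) (s : List Char), s.length ≤ n →
    (PySem.Chars.rfind s "range".toList = -1 →
      (pvFields s).reverse.find? (fun f => PySem.Chars.isIn "range".toList f) = none) ∧
    (PySem.Chars.rfind s "range".toList ≠ -1 →
      (pvFields s).reverse.find? (fun f => PySem.Chars.isIn "range".toList f) = some (pvBField s)) := by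
  have hRu : '_' ∉ "range".toList := by decide
  have hRne : "range".toList ≠ [] := by decide
  intro n
  induction n with
  | zero =>
    intro s hs
    have hnil : s = [] := List.eq_nil_of_length_eq_zero (by omega)
    exact hnil ▸ pv_single [] (by simp)
  | succ n ih =>
    intro s hs
    by_cases hc : '_' ∈ s
    · obtain ⟨a, b, rfl, ha⟩ := List.eq_append_cons_of_mem hc
      have hlb : b.length ≤ n := by
        simp only [List.length_append, List.length_cons] at hs
        omega
      obtain ⟨ihb1, ihb2⟩ := ih b hlb
      have hsplit : pvFields (a ++ '_' :: b) = a :: pvFields b := pvFields_append a b ha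
      have hrs : PySem.Chars.rfind (a ++ '_' :: b) "range".toList
          = (if PySem.Chars.rfind b "range".toList = -1 then PySem.Chars.rfind a "range".toList
             else (a.length : ℤ) + 1 + PySem.Chars.rfind b "range".toList) :=
        rfind_sub_append _ a b hRu hRne
      by_cases hRb : PySem.Chars.rfind b "range".toList = -1
      · rw [if_pos hRb] at hrs
        by_cases hRa : PySem.Chars.rfind a "range".toList = -1
        · constructor
          · intro _
            have hIn : PySem.Chars.isIn "range".toList a = false := by
              by_cases hi : PySem.Chars.isIn "range".toList a = true
              · exact absurd hRa ((isIn_iff_rfind_ne a _ hRne).mp hi)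
              · simpa using hi
            rw [hsplit, List.reverse_cons, List.find?_append, ihb1 hRb, Option.none_or]
            rw [List.find?_cons_of_neg (by rw [hIn]; simp), List.find?_nil]
          · intro h
            rw [hrs] at h
            exact absurd hRa h
        · constructor
          · intro h
            rw [hrs] at h
            exact absurd h hRa
          · intro _
            have hIn : PySem.Chars.isIn "range".toList a = true :=
              (isIn_iff_rfind_ne a _ hRne).mpr hRa
            rw [pvBField_left a b ha hRa hRb]
            rw [hsplit, List.reverse_cons, List.find?_append, ihb1 hRb, Option.none_or]
            rw [List.find?_cons_of_pos hIn]
      · rw [if_neg hRb] at hrs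
        have hble := neg_one_le_rfind b "range".toList hRne
        constructor
        · intro h
          rw [hrs] at h
          omega
        · intro _
          rw [pvBField_right a b ha hRb]
          rw [hsplit, List.reverse_cons, List.find?_append, ihb2 hRb, Option.some_or]
    · exact pv_single s hc


lemma rfindFrom_zero_natCast (s sub : List Char) (k : ℕ) (hk : k ≤ s.length) :
    PySem.Chars.rfindFrom s sub 0 (some (k : ℤ)) =
      (if PySem.Chars.rfind (s.take k) sub = -1 then -1 else PySem.Chars.rfind (s.take k) sub) := by
  simp only [PySem.Chars.rfindFrom]
  rw [if_neg (by omega : ¬ (s.length : ℤ) < (k : ℤ))]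
  rw [if_neg (by omega : ¬ (k : ℤ) < 0)]
  norm_num

lemma portB_field (stem : String)
    (h0 : 0 ≤ PySem.Chars.rfind stem.toList "range".toList) :
    (if PySem.Str.findFrom stem "_" (PySem.Str.rfind stem "range") none < 0
     then PySem.Str.slice stem
            (some (PySem.Str.rfindFrom stem "_" 0 (some (PySem.Str.rfind stem "range")) + 1)) none
     else PySem.Str.slice stem
            (some (PySem.Str.rfindFrom stem "_" 0 (some (PySem.Str.rfind stem "range")) + 1))
            (some (PySem.Str.findFrom stem "_" (PySem.Str.rfind stem "range") none))).toList
    = pvBField stem.toList := by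
  have hRne : "range".toList ≠ [] := by decide
  have hus : "_".toList = ['_'] := by decide
  have hle : PySem.Chars.rfind stem.toList "range".toList ≤ (stem.toList.length : ℤ) := by
    rcases rfind_cases stem.toList _ hRne with ⟨h1, _⟩ | ⟨j, hj, h1, _, _⟩
    · rw [h1] at h0; omega
    · rw [h1]; omega
  have hicast : ((PySem.Chars.rfind stem.toList "range".toList).toNat : ℤ)
      = PySem.Chars.rfind stem.toList "range".toList := Int.toNat_of_nonneg h0
  -- move everything to the Chars level
  rw [PySem.Str.rfind_eq, PySem.Str.rfindFrom_eq, PySem.Str.findFrom_eq, hus]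
  rw [← hicast, rfindFrom_zero_natCast _ _ _ (by omega)]
  rw [PySem.Chars.findFrom_natCast _ _ _ (by omega)]
  set s := stem.toList with hsdef
  set k := (PySem.Chars.rfind s "range".toList).toNat with hkdef
  set r := PySem.Chars.rfind (s.take k) ['_'] with hrdef
  set q := PySem.Chars.find (s.drop k) ['_'] with hqdef
  have hrge : -1 ≤ r := neg_one_le_rfind _ _ (by simp)
  have hqge : -1 ≤ q := PySem.Chars.neg_one_le_find _ _
  simp only [pvBField, ← hicast, Int.toNat_natCast, ← hrdef, ← hqdef]
  by_cases hr1 : r = -1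
  · rw [hr1]
    by_cases hq1 : q = -1
    · rw [hq1]
      norm_num
      rfl
    · rw [if_neg hq1, if_neg hq1, if_neg (by omega : ¬ (k : ℤ) + q < 0)]
      norm_num
      rw [PySem.List.slice_to _ (by omega)]
  · rw [if_neg hr1]
    by_cases hq1 : q = -1
    · rw [hq1]
      norm_num
      rw [PySem.List.slice_from _ (by omega)]
    · rw [if_neg hq1, if_neg hq1, if_neg (by omega : ¬ (k : ℤ) + q < 0)]
      norm_num
      rw [PySem.List.slice_toNat _ (by omega) (by omega)]

-- stem-level master equation: A's fold over the '_'-fields = B's rfind/slice computation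
lemma stem_equiv (stem : String) :
    (pvSplit stem "_").foldl (fun output fname_field =>
        if PySem.Str.isIn "range" fname_field then pvParseField fname_field else output) [0, 0, 0]
    = (if PySem.Str.rfind stem "range" < 0 then ([0, 0, 0] : List Int)
       else pvParseField (
         if PySem.Str.findFrom stem "_" (PySem.Str.rfind stem "range") none < 0
         then PySem.Str.slice stem
                (some (PySem.Str.rfindFrom stem "_" 0 (some (PySem.Str.rfind stem "range")) + 1)) none
         else PySem.Str.slice stem
                (some (PySem.Str.rfindFrom stem "_" 0 (some (PySem.Str.rfind stem "range")) + 1))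
                (some (PySem.Str.findFrom stem "_" (PySem.Str.rfind stem "range") none)))) := by
  rw [foldl_if_eq_find_rev (fun f => PySem.Str.isIn "range" f) pvParseField]
  -- the String fields are exactly pvFields of the char list
  obtain ⟨F, hF, hFm⟩ : ∃ F : List String, PySem.Str.split? stem "_" = some F ∧
      F.map String.toList = pvFields stem.toList := by
    have h := PySem.Str.split?_map stem "_"
    have h2 : PySem.Chars.split? stem.toList "_".toList
        = some (PySem.Chars.splitOn stem.toList ['_']) := by
      have : "_".toList = ['_'] := by decide
      rw [this, PySem.Chars.split?]
      simp
    rw [h2] at h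
    cases hFo : PySem.Str.split? stem "_" with
    | none => rw [hFo] at h; simp at h
    | some F =>
      rw [hFo] at h
      simp only [Option.map_some, Option.some_inj] at h
      exact ⟨F, rfl, by rw [h, splitOn_eq_pvFields]⟩
  have hps : pvSplit stem "_" = F := by rw [pvSplit, hF]; rfl
  rw [hps]
  have hfind : (List.find? (fun f => PySem.Str.isIn "range" f) F.reverse).map String.toList
      = List.find? (fun f => PySem.Chars.isIn "range".toList f) (pvFields stem.toList).reverse := by
    have hrev : (pvFields stem.toList).reverse = (F.reverse).map String.toList := by
      rw [← hFm, List.map_reverse]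
    have hpred : (fun f : String => PySem.Str.isIn "range" f)
        = ((fun l => PySem.Chars.isIn "range".toList l) ∘ String.toList) := by
      funext f
      simp [PySem.Str.isIn_eq]
    rw [hrev, List.find?_map, hpred]
  rcases pv_main stem.toList.length stem.toList (le_refl _) with ⟨hm1, hm2⟩
  by_cases hi : PySem.Chars.rfind stem.toList "range".toList = -1
  · rw [if_pos (by rw [PySem.Str.rfind_eq]; omega)]
    have hn : List.find? (fun f => PySem.Str.isIn "range" f) F.reverse = none := by
      have := hfind.trans (hm1 hi)
      exact Option.map_eq_none_iff.mp this
    rw [hn]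
  · have h0 : 0 ≤ PySem.Chars.rfind stem.toList "range".toList := by
      have := neg_one_le_rfind stem.toList "range".toList (by decide)
      omega
    rw [if_neg (by rw [PySem.Str.rfind_eq]; omega)]
    cases ho : List.find? (fun f => PySem.Str.isIn "range" f) F.reverse with
    | none =>
      rw [ho] at hfind
      rw [hm2 hi] at hfind
      simp at hfind
    | some g =>
      rw [ho] at hfind
      rw [hm2 hi] at hfind
      simp only [Option.map_some, Option.some_inj] at hfind
      show pvParseField g = _
      congr 1
      apply String.toList_inj.mp
      rw [hfind]
      exact (portB_field stem h0).symm

-- ===== VERDICT (by name: the statement is the Claim_ definition above) =====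
theorem get_configs_filename_spec : Claim_equal_get_configs_filename := by
  intro in_file _ _
  unfold Spec_get_configs_filename get_configs_filename get_configs_filename_alt
  exact stem_equiv ((PySem.List.pyGet? (pvSplit in_file ".txt") 0).getD "")
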